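-- pv_equiv track=rewrite | github.com/devgxrg/RoadVisionChatbotBackendV2 | app/modules/bidsynopsis/synopsis_service.py | _clean_field_prefix
-- ===== SOURCE A (Python) =====
-- def _clean_field_prefix(text: str, field_name: str) -> str:
--     """Remove field name prefix if it exists at the start of the text."""
--     if not text or not field_name:
--         return text
--
--     # Clean field name variations
--     field_variations = [
--         f"{field_name}:",
--         f"{field_name} :",
--         f"{field_name.replace(' ', '_')}:",
--         f"{field_name.replace('_', ' ')}:",
--         f"{field_name.lower()}:",
--         f"{field_name.upper()}:",
--         f"{field_name.title()}:"
--     ]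
--
--     text_clean = text.strip()
--     for variation in field_variations:
--         if text_clean.lower().startswith(variation.lower()):
--             return text_clean[len(variation):].strip()
--
--     return text
-- ===== SOURCE B (Python) =====
-- def _clean_field_prefix(text: str, field_name: str) -> str:
--     """Remove field name prefix if it exists at the start of the text."""
--     if not text or not field_name:
--         return text
--     tc = text.strip()
--     # One simultaneous pass over tc and field_name with three boolean match
--     # states: exact name, all spaces->underscores, all underscores->spaces
--     # (case-insensitive). Correct because, case-insensitively, A's seven
--     # variations collapse to these three names followed by ':' plus the
--     # exact name followed by ' :'.
--     a = u = s = True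
--     i = 0
--     for fc in field_name:
--         if i >= len(tc):
--             return text
--         t = tc[i].lower()
--         f = fc.lower()
--         a = a and t == f
--         u = u and t == ('_' if f == ' ' else f)
--         s = s and t == (' ' if f == '_' else f)
--         if not (a or u or s):
--             return text
--         i += 1
--     if (a or u or s) and tc[i:i + 1] == ':':
--         return tc[i + 1:].strip()
--     if a and tc[i:i + 2] == ' :':
--         return tc[i + 2:].strip()
--     return text
-- ===== Notes on version B (the rewrite author's own statement) =====
-- stated objective: alternative
-- what changed: A builds a 7-element list of variation strings (replace/lower/upper/title copies of the field name plus ':'/' :') and scans it with case-insensitive startswith; B never builds any variation string: it makes one simultaneous character-by-character pass over the stripped text and the field name, carrying three boolean match states (exact name, all spaces->underscores, all underscores->spaces) with early exit when all states die, then checks the one following ':' or ' :' character directly.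
import Mathlib
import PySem

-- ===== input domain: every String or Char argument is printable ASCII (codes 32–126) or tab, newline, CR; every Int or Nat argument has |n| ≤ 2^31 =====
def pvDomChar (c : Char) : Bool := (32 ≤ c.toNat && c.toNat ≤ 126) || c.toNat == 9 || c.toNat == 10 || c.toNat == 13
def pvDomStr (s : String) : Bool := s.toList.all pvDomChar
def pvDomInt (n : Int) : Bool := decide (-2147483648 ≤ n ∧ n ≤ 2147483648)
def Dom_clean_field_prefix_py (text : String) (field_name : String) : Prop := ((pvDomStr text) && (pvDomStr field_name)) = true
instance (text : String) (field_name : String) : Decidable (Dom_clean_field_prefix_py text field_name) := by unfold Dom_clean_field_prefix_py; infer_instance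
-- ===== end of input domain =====

-- B replaces A's seven-variation list and startswith loop by a single simultaneous
-- character scan over text and field_name carrying three boolean match states
-- (objective: alternative; no variation strings are ever built).

-- ===== PORT A =====
-- hand port of Python str.title (no PySem primitive); exact on the ASCII domain:
-- a letter is uppercased when the previous character is not a letter, lowercased otherwise
def titleChars : List Char → Bool → List Char
  | [], _ => []
  | c :: cs, prev =>
    (if PySem.Chars.isalpha c then
       (if prev then PySem.Chars.lowerChar c else PySem.Chars.upperChar c)
     else c) :: titleChars cs (PySem.Chars.isalpha c)

-- the 'for variation in field_variations' loop of A
def cfpLoop (text : String) (tc : List Char) : List (List Char) → String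
  | [] => text
  | v :: vs =>
    if PySem.Chars.startswith (PySem.Chars.lower tc) (PySem.Chars.lower v) then
      String.ofList (PySem.Chars.strip (PySem.List.slice tc (some (v.length : Int)) none))
    else cfpLoop text tc vs

def clean_field_prefix_py (text : String) (field_name : String) : String :=
  if text = "" ∨ field_name = "" then text
  else
    let f := field_name.toList
    let variations : List (List Char) :=
      [ f ++ [':'],
        f ++ [' ', ':'],
        PySem.Chars.replace f [' '] ['_'] ++ [':'],
        PySem.Chars.replace f ['_'] [' '] ++ [':'],
        PySem.Chars.lower f ++ [':'],
        PySem.Chars.upper f ++ [':'],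
        titleChars f false ++ [':'] ]
    cfpLoop text (PySem.Chars.strip text.toList) variations

-- ===== PORT B =====
-- the 'for fc in field_name' loop of Source B: one pass, three boolean match states
-- (exact name / spaces→underscores / underscores→spaces, case-insensitive);
-- none = the loop's early 'return text' (text exhausted or all states dead)
def cfpScan : List Char → List Char → Bool → Bool → Bool → Option (Bool × Bool × Bool)
  | [], _, a, u, s => some (a, u, s)
  | _ :: _, [], _, _, _ => none
  | fc :: fs, t :: ts, a, u, s =>
    let tl := PySem.Chars.lowerChar t
    let fl := PySem.Chars.lowerChar fc
    let a' := a && (tl == fl)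
    let u' := u && (tl == (if fl == ' ' then '_' else fl))
    let s' := s && (tl == (if fl == '_' then ' ' else fl))
    if (a' || u' || s') = true then cfpScan fs ts a' u' s' else none

def clean_field_prefix_py_alt (text : String) (field_name : String) : String :=
  if text = "" ∨ field_name = "" then text
  else
    let tc := PySem.Chars.strip text.toList
    match cfpScan field_name.toList tc true true true with
    | none => text
    | some (a, u, s) =>
      let n := field_name.toList.length
      if (a || u || s) && (PySem.List.slice tc (some (n : Int)) (some ((n : Int) + 1)) == [':']) then
        String.ofList (PySem.Chars.strip (PySem.List.slice tc (some ((n : Int) + 1)) none))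
      else if a && (PySem.List.slice tc (some (n : Int)) (some ((n : Int) + 2)) == [' ', ':']) then
        String.ofList (PySem.Chars.strip (PySem.List.slice tc (some ((n : Int) + 2)) none))
      else text

-- ===== PRECONDITION & SPEC =====
def Spec_clean_field_prefix_py (text : String) (field_name : String) (out : String) : Prop := out = clean_field_prefix_py_alt text field_name
instance (text : String) (field_name : String) (out : String) : Decidable (Spec_clean_field_prefix_py text field_name out) := by unfold Spec_clean_field_prefix_py; infer_instance

-- ===== CLAIM (what is proved, stated in full; the proofs are below) =====
def Claim_equal_clean_field_prefix_py : Prop := ∀ (text : String) (field_name : String), Dom_clean_field_prefix_py text field_name → Spec_clean_field_prefix_py text field_name (clean_field_prefix_py text field_name)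

-- ===== LEMMAS AND PROOFS =====

-- common canonical form both ports are reduced to (proof-side helper only)
def cfpCanon (text : String) (field_name : String) : String :=
  if text = "" ∨ field_name = "" then text
  else
    let tc := PySem.Chars.strip text.toList
    let low := PySem.Chars.lower tc
    let fl := PySem.Chars.lower field_name.toList
    let n := field_name.toList.length
    let names : List (List Char) :=
      [ fl,
        PySem.Chars.lower (PySem.Chars.replace field_name.toList [' '] ['_']),
        PySem.Chars.lower (PySem.Chars.replace field_name.toList ['_'] [' ']) ]
    if low.take n ∈ names ∧ (low.drop n).take 1 = [':'] then
      String.ofList (PySem.Chars.strip (PySem.List.slice tc (some ((n : Int) + 1)) none))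
    else if low.take n = fl ∧ (low.drop n).take 2 = [' ', ':'] then
      String.ofList (PySem.Chars.strip (PySem.List.slice tc (some ((n : Int) + 2)) none))
    else text

theorem pv_toNat_ofNat {n : Nat} (h : n < 55296) : (Char.ofNat n).toNat = n := by
  rw [Char.toNat_ofNat, if_pos (Or.inl h)]

theorem pv_isupper_iff (c : Char) : PySem.Chars.isupper c = true ↔ 65 ≤ c.toNat ∧ c.toNat ≤ 90 := by
  rw [PySem.Chars.isupper]
  simp only [Bool.and_eq_true, decide_eq_true_eq, Char.le_def, UInt32.le_iff_toNat_le]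
  exact Iff.rfl

theorem pv_islower_iff (c : Char) : PySem.Chars.islower c = true ↔ 97 ≤ c.toNat ∧ c.toNat ≤ 122 := by
  rw [PySem.Chars.islower]
  simp only [Bool.and_eq_true, decide_eq_true_eq, Char.le_def, UInt32.le_iff_toNat_le]
  exact Iff.rfl

theorem lowerChar_lowerChar (c : Char) : PySem.Chars.lowerChar (PySem.Chars.lowerChar c) = PySem.Chars.lowerChar c := by
  unfold PySem.Chars.lowerChar
  by_cases h : PySem.Chars.isupper c = true
  · rw [if_pos h]
    have h' := (pv_isupper_iff c).1 h
    have hv : (Char.ofNat (c.toNat + 32)).toNat = c.toNat + 32 := pv_toNat_ofNat (by omega)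
    rw [if_neg]
    intro hc
    have := (pv_isupper_iff _).1 hc
    omega
  · rw [if_neg h, if_neg h]

theorem lowerChar_upperChar (c : Char) : PySem.Chars.lowerChar (PySem.Chars.upperChar c) = PySem.Chars.lowerChar c := by
  unfold PySem.Chars.lowerChar PySem.Chars.upperChar
  by_cases h : PySem.Chars.islower c = true
  · rw [if_pos h]
    have h' := (pv_islower_iff c).1 h
    have hv : (Char.ofNat (c.toNat - 32)).toNat = c.toNat - 32 := pv_toNat_ofNat (by omega)
    have hu : PySem.Chars.isupper (Char.ofNat (c.toNat - 32)) = true := by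
      rw [pv_isupper_iff, hv]; omega
    have hnu : ¬ PySem.Chars.isupper c = true := by
      intro hc; have := (pv_isupper_iff c).1 hc; omega
    rw [if_pos hu, if_neg hnu]
    have h32 : (Char.ofNat (c.toNat - 32)).toNat + 32 = c.toNat := by omega
    rw [h32, Char.ofNat_toNat]
  · rw [if_neg h]

theorem lower_lower (s : List Char) : PySem.Chars.lower (PySem.Chars.lower s) = PySem.Chars.lower s := by
  simp [PySem.Chars.lower, lowerChar_lowerChar]

theorem lower_upper (s : List Char) : PySem.Chars.lower (PySem.Chars.upper s) = PySem.Chars.lower s := by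
  simp [PySem.Chars.lower, PySem.Chars.upper, lowerChar_upperChar]

theorem lower_title (s : List Char) (b : Bool) : PySem.Chars.lower (titleChars s b) = PySem.Chars.lower s := by
  induction s generalizing b with
  | nil => rfl
  | cons c cs ih =>
    simp only [titleChars, PySem.Chars.lower, List.map_cons] at *
    rw [ih]
    by_cases h : PySem.Chars.isalpha c = true
    · cases b <;> simp [h, lowerChar_lowerChar, lowerChar_upperChar]
    · simp [h]

theorem title_length (s : List Char) (b : Bool) : (titleChars s b).length = s.length := by
  induction s generalizing b with
  | nil => rfl
  | cons c cs ih => simp [titleChars, ih]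

theorem replace_go_single_map (a b : Char) : ∀ (fuel : Nat) (l acc : List Char), l.length ≤ fuel →
    PySem.Chars.replace.go [a] [b] fuel l acc = acc.reverse ++ l.map (fun c => if c = a then b else c) := by
  intro fuel
  induction fuel with
  | zero =>
    intro l acc h
    have : l = [] := List.length_eq_zero_iff.mp (Nat.le_zero.mp h)
    subst this
    simp [PySem.Chars.replace.go]
  | succ n ih =>
    intro l acc h
    cases l with
    | nil => simp [PySem.Chars.replace.go]
    | cons c t =>
      rw [PySem.Chars.replace.go]
      simp only [List.isPrefixOf, Bool.and_true]
      by_cases hac : a = c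
      · subst hac
        rw [if_pos (by simp)]
        simp only [List.length_cons, List.drop_succ_cons, List.drop_zero, List.length_nil]
        rw [ih t _ (by simpa using h)]
        simp
      · rw [if_neg (by simp [hac])]
        rw [ih t _ (by simpa using h)]
        simp [Ne.symm hac]

theorem replace_single_map (s : List Char) (a b : Char) :
    PySem.Chars.replace s [a] [b] = s.map (fun c => if c = a then b else c) := by
  rw [PySem.Chars.replace]
  simp only [List.isEmpty_cons]
  exact (replace_go_single_map a b s.length s [] (le_refl _)).trans (by simp)

theorem replace_single_length (s : List Char) (a b : Char) :
    (PySem.Chars.replace s [a] [b]).length = s.length := by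
  simp [replace_single_map]

theorem prefix_append_iff (p q low : List Char) :
    p ++ q <+: low ↔ low.take p.length = p ∧ (low.drop p.length).take q.length = q := by
  constructor
  · intro h
    have hp : p <+: low := (List.prefix_append p q).trans h
    have htake : low.take p.length = p := ((List.prefix_iff_eq_take.1 hp)).symm
    refine ⟨htake, ?_⟩
    have hlow : low = p ++ low.drop p.length := by
      conv_lhs => rw [← List.take_append_drop p.length low]
      rw [htake]
    rw [hlow] at h
    have hq : q <+: low.drop p.length := (List.prefix_append_right_inj p).1 h
    exact (List.prefix_iff_eq_take.1 hq).symm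
  · rintro ⟨h1, h2⟩
    have hq : q <+: low.drop p.length := by
      rw [List.prefix_iff_eq_take]; exact h2.symm
    have hlow : low = p ++ low.drop p.length := by
      conv_lhs => rw [← List.take_append_drop p.length low]
      rw [h1]
    rw [hlow]
    exact (List.prefix_append_right_inj p).2 hq

theorem chain_eq (P1 P2 P3 D1 D2 : Prop) [Decidable P1] [Decidable P2] [Decidable P3]
    [Decidable D1] [Decidable D2] (hinc : D2 → ¬ D1) (s1 s2 t : String) :
    (if P1 ∧ D1 then s1 else if P1 ∧ D2 then s2 else if P2 ∧ D1 then s1 else if P3 ∧ D1 then s1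
      else if P1 ∧ D1 then s1 else if P1 ∧ D1 then s1 else if P1 ∧ D1 then s1 else t)
    = (if (P1 ∨ P2 ∨ P3) ∧ D1 then s1 else if P1 ∧ D2 then s2 else t) := by
  by_cases d1 : D1
  · have nd2 : ¬ D2 := fun d2 => hinc d2 d1
    by_cases p1 : P1 <;> by_cases p2 : P2 <;> by_cases p3 : P3 <;> simp [d1, nd2, p1, p2, p3]
  · by_cases p1 : P1 <;> simp [d1, p1]

theorem take_two_take_one (l : List Char) (x y : Char) (h : l.take 2 = [x, y]) : l.take 1 = [x] := by
  cases l with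
  | nil => simp at h
  | cons a t => simp at h ⊢; exact h.1

-- A's port equals the canonical form (this is the old A-side argument)
theorem a_eq_canon (text : String) (field_name : String) :
    clean_field_prefix_py text field_name = cfpCanon text field_name := by
  unfold clean_field_prefix_py cfpCanon
  by_cases hg : text = "" ∨ field_name = ""
  · rw [if_pos hg, if_pos hg]
  · rw [if_neg hg, if_neg hg]
    simp only [cfpLoop]
    set f := field_name.toList with hf
    set tc := PySem.Chars.strip text.toList with htc
    set low := PySem.Chars.lower tc with hlow
    set fl := PySem.Chars.lower f with hfldef
    set n := f.length with hn
    have hmap : ∀ (u v : List Char), PySem.Chars.lower (u ++ v) = PySem.Chars.lower u ++ PySem.Chars.lower v := by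
      intro u v; simp [PySem.Chars.lower]
    have hcolon : PySem.Chars.lower [':'] = [':'] := by decide
    have hsp : PySem.Chars.lower [' ', ':'] = [' ', ':'] := by decide
    have hfl_len : fl.length = n := by simp [hfldef, PySem.Chars.lower, hn]
    have hg2_len : (PySem.Chars.lower (PySem.Chars.replace f [' '] ['_'])).length = n := by
      simp [PySem.Chars.lower, replace_single_length, hn]
    have hg3_len : (PySem.Chars.lower (PySem.Chars.replace f ['_'] [' '])).length = n := by
      simp [PySem.Chars.lower, replace_single_length, hn]
    have hsw : ∀ (p q : List Char), (PySem.Chars.startswith low (p ++ q) = true) =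
        (low.take p.length = p ∧ (low.drop p.length).take q.length = q) := by
      intro p q
      rw [eq_iff_iff, PySem.Chars.startswith_iff, prefix_append_iff]
    have hlfl : PySem.Chars.lower fl = fl := by rw [hfldef, lower_lower]
    have hup_len : (PySem.Chars.upper f).length = n := by simp [PySem.Chars.upper, hn]
    simp only [hmap, hcolon, hsp, lower_upper, lower_title, hsw, hfl_len,
      hg2_len, hg3_len, List.length_cons, List.length_nil, List.length_append,
      replace_single_length, title_length, List.mem_cons, List.not_mem_nil, or_false, ← hfldef, ← hn]
    simp only [hlfl, hup_len, hfl_len, Nat.zero_add, Nat.cast_add, Nat.cast_one]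
    have hD12 : (low.drop n).take 2 = [' ', ':'] → ¬ ((low.drop n).take 1 = [':']) := by
      intro h2 h1
      rw [take_two_take_one _ _ _ h2] at h1
      simp at h1
    push_cast
    exact chain_eq _ _ _ _ _ hD12 _ _ _

-- per-character substitution functions of B's scan, on lowered characters
def repU (c : Char) : Char :=
  if PySem.Chars.lowerChar c = ' ' then '_' else PySem.Chars.lowerChar c
def repS (c : Char) : Char :=
  if PySem.Chars.lowerChar c = '_' then ' ' else PySem.Chars.lowerChar c

-- lowerChar fixes (and only reaches) non-letter characters such as ':', ' ', '_'
theorem lowerChar_eq_fixed (c d : Char) (hd : d.toNat < 97 ∨ 122 < d.toNat)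
    (hd2 : PySem.Chars.isupper d = false) : PySem.Chars.lowerChar c = d ↔ c = d := by
  unfold PySem.Chars.lowerChar
  by_cases h : PySem.Chars.isupper c = true
  · rw [if_pos h]
    have h' := (pv_isupper_iff c).1 h
    have hv : (Char.ofNat (c.toNat + 32)).toNat = c.toNat + 32 := pv_toNat_ofNat (by omega)
    constructor
    · intro he
      have := congrArg Char.toNat he
      rw [hv] at this
      omega
    · intro he
      subst he
      rw [h] at hd2
      exact absurd hd2 (by simp)
  · rw [if_neg h]

-- B's scan characterized: it succeeds iff the field fits and some state survives,
-- and the surviving states are exactly the three per-character prefix matches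
theorem cfpScan_char : ∀ (f r : List Char) (a u s : Bool),
    cfpScan f r a u s =
      if f.length ≤ r.length ∧ (f = [] ∨
          (a && ((r.take f.length).map PySem.Chars.lowerChar == f.map PySem.Chars.lowerChar)
           || u && ((r.take f.length).map PySem.Chars.lowerChar == f.map repU)
           || s && ((r.take f.length).map PySem.Chars.lowerChar == f.map repS)) = true)
      then some (a && ((r.take f.length).map PySem.Chars.lowerChar == f.map PySem.Chars.lowerChar),
                 u && ((r.take f.length).map PySem.Chars.lowerChar == f.map repU),
                 s && ((r.take f.length).map PySem.Chars.lowerChar == f.map repS))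
      else none := by
  intro f
  induction f with
  | nil =>
    intro r a u s
    simp [cfpScan]
  | cons fc fs ih =>
    intro r a u s
    cases r with
    | nil =>
      rw [cfpScan]
      rw [if_neg]
      intro h
      simp at h
    | cons t ts =>
      rw [cfpScan]
      rw [ih]
      have hsplit : ∀ (g : Char → Char),
          (((t :: ts).take (fc :: fs).length).map PySem.Chars.lowerChar == (fc :: fs).map g)
          = ((PySem.Chars.lowerChar t == g fc) && ((ts.take fs.length).map PySem.Chars.lowerChar == fs.map g)) := by
        intro g
        simp only [List.length_cons, List.take_succ_cons, List.map_cons, List.cons_beq_cons]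
      have hgu : (if PySem.Chars.lowerChar fc == ' ' then '_' else PySem.Chars.lowerChar fc) = repU fc := by
        simp [repU, beq_iff_eq]
      have hgs : (if PySem.Chars.lowerChar fc == '_' then ' ' else PySem.Chars.lowerChar fc) = repS fc := by
        simp [repS, beq_iff_eq]
      rw [hgu, hgs]
      rw [hsplit PySem.Chars.lowerChar, hsplit repU, hsplit repS]
      set A1 := (PySem.Chars.lowerChar t == PySem.Chars.lowerChar fc) with hA1
      set U1 := (PySem.Chars.lowerChar t == repU fc) with hU1
      set S1 := (PySem.Chars.lowerChar t == repS fc) with hS1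
      set A2 := ((ts.take fs.length).map PySem.Chars.lowerChar == fs.map PySem.Chars.lowerChar) with hA2
      set U2 := ((ts.take fs.length).map PySem.Chars.lowerChar == fs.map repU) with hU2
      set S2 := ((ts.take fs.length).map PySem.Chars.lowerChar == fs.map repS) with hS2
      by_cases hd : (a && A1 || u && U1 || s && S1) = true
      · rw [if_pos hd]
        have ha : (a && A1 && A2) = (a && (A1 && A2)) := by rw [Bool.and_assoc]
        have hu : (u && U1 && U2) = (u && (U1 && U2)) := by rw [Bool.and_assoc]
        have hs : (s && S1 && S2) = (s && (S1 && S2)) := by rw [Bool.and_assoc]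
        rw [ha, hu, hs]
        have hiff : (fs.length ≤ ts.length ∧ (fs = [] ∨
              (a && (A1 && A2) || u && (U1 && U2) || s && (S1 && S2)) = true))
            ↔ ((fc :: fs).length ≤ (t :: ts).length ∧ ((fc :: fs) = [] ∨
              (a && (A1 && A2) || u && (U1 && U2) || s && (S1 && S2)) = true)) := by
          simp only [List.length_cons, Nat.add_le_add_iff_right, reduceCtorEq, false_or]
          constructor
          · rintro ⟨hl, he | hb⟩
            · refine ⟨hl, ?_⟩
              subst he
              have hA2' : A2 = true := by simp [hA2]
              have hU2' : U2 = true := by simp [hU2]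
              have hS2' : S2 = true := by simp [hS2]
              rw [hA2', hU2', hS2']
              simpa using hd
            · exact ⟨hl, hb⟩
          · rintro ⟨hl, hb⟩
            exact ⟨hl, Or.inr hb⟩
        rw [if_congr hiff rfl rfl]
      · rw [if_neg hd]
        rw [if_neg]
        rintro ⟨-, hor⟩
        rcases hor with he | hb
        · exact absurd he (by simp)
        · apply hd
          simp only [Bool.or_eq_true, Bool.and_eq_true] at hb ⊢
          tauto

theorem map_lower_colon (l : List Char) : l.map PySem.Chars.lowerChar = [':'] ↔ l = [':'] := by
  have h1 : ∀ c, PySem.Chars.lowerChar c = ':' ↔ c = ':' :=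
    fun c => lowerChar_eq_fixed c ':' (by decide) (by decide)
  cases l with
  | nil => simp
  | cons c t => simp [h1 c, List.map_eq_nil_iff]

theorem map_lower_spcolon (l : List Char) : l.map PySem.Chars.lowerChar = [' ', ':'] ↔ l = [' ', ':'] := by
  have h1 : ∀ c, PySem.Chars.lowerChar c = ' ' ↔ c = ' ' :=
    fun c => lowerChar_eq_fixed c ' ' (by decide) (by decide)
  cases l with
  | nil => simp
  | cons c t =>
    simp only [List.map_cons, List.cons.injEq, h1 c]
    constructor
    · rintro ⟨hc, ht⟩
      exact ⟨hc, (map_lower_colon t).mp ht⟩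
    · rintro ⟨hc, ht⟩
      exact ⟨hc, (map_lower_colon t).mpr ht⟩

theorem lower_replace_under (f : List Char) :
    PySem.Chars.lower (PySem.Chars.replace f [' '] ['_']) = f.map repU := by
  rw [replace_single_map]
  simp only [PySem.Chars.lower, List.map_map]
  refine List.map_congr_left ?_
  intro c _
  by_cases hc : c = ' '
  · subst hc
    decide
  · simp only [Function.comp_apply, if_neg hc, repU]
    rw [if_neg]
    intro h
    exact hc ((lowerChar_eq_fixed c ' ' (by decide) (by decide)).mp h)

theorem lower_replace_space (f : List Char) :
    PySem.Chars.lower (PySem.Chars.replace f ['_'] [' ']) = f.map repS := by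
  rw [replace_single_map]
  simp only [PySem.Chars.lower, List.map_map]
  refine List.map_congr_left ?_
  intro c _
  by_cases hc : c = '_'
  · subst hc
    decide
  · simp only [Function.comp_apply, if_neg hc, repS]
    rw [if_neg]
    intro h
    exact hc ((lowerChar_eq_fixed c '_' (by decide) (by decide)).mp h)

-- B's port equals the canonical form
theorem alt_eq_canon (text : String) (field_name : String) :
    clean_field_prefix_py_alt text field_name = cfpCanon text field_name := by
  unfold clean_field_prefix_py_alt cfpCanon
  by_cases hg : text = "" ∨ field_name = ""
  · rw [if_pos hg, if_pos hg]
  · rw [if_neg hg, if_neg hg]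
    have hf : field_name.toList ≠ [] := by
      intro h
      exact hg (Or.inr (String.toList_eq_nil_iff.mp h))
    dsimp only
    set tc := PySem.Chars.strip text.toList with htc
    set f := field_name.toList with hfdef
    set n := f.length with hn
    rw [cfpScan_char]
    have hslice1 : PySem.List.slice tc (some (n : Int)) (some ((n : Int) + 1)) = (tc.drop n).take 1 := by
      have := PySem.List.slice_natCast_add tc n 1
      simpa using this
    have hslice2 : PySem.List.slice tc (some (n : Int)) (some ((n : Int) + 2)) = (tc.drop n).take 2 := by
      have := PySem.List.slice_natCast_add tc n 2
      simpa using this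
    have hlu : List.map PySem.Chars.lowerChar (PySem.Chars.replace f [' '] ['_']) = f.map repU :=
      lower_replace_under f
    have hls : List.map PySem.Chars.lowerChar (PySem.Chars.replace f ['_'] [' ']) = f.map repS :=
      lower_replace_space f
    have hc1 : (((List.map PySem.Chars.lowerChar tc).drop n).take 1 = [':']) ↔ ((tc.drop n).take 1 = [':']) := by
      rw [← List.map_drop, ← List.map_take]
      exact map_lower_colon _
    have hc2 : (((List.map PySem.Chars.lowerChar tc).drop n).take 2 = [' ', ':']) ↔ ((tc.drop n).take 2 = [' ', ':']) := by
      rw [← List.map_drop, ← List.map_take]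
      exact map_lower_spcolon _
    by_cases hlen : n ≤ tc.length
    · by_cases hA : (List.map PySem.Chars.lowerChar tc).take n = f.map PySem.Chars.lowerChar
        <;> by_cases hU : (List.map PySem.Chars.lowerChar tc).take n = f.map repU
        <;> by_cases hS : (List.map PySem.Chars.lowerChar tc).take n = f.map repS
        <;> simp [hf, hlen, ← hn, hA, hU, hS, hslice1, hslice2, hlu, hls, hc1, hc2,
              PySem.Chars.lower, List.map_take, beq_iff_eq]
    · -- the field does not fit: the scan fails and no canonical name can match either
      rw [if_neg (fun h => hlen h.1)]
      have hlt : tc.length < n := Nat.lt_of_not_le hlen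
      have hne : ∀ (g : Char → Char), ¬ ((PySem.Chars.lower tc).take n = f.map g) := by
        intro g h
        have := congrArg List.length h
        simp [PySem.Chars.lower] at this
        omega
      rw [if_neg, if_neg]
      · rintro ⟨h1, -⟩
        exact hne PySem.Chars.lowerChar h1
      · rintro ⟨h1, -⟩
        simp only [List.mem_cons, List.not_mem_nil, or_false] at h1
        rcases h1 with h1 | h1 | h1
        · exact hne PySem.Chars.lowerChar h1
        · rw [show PySem.Chars.lower (PySem.Chars.replace f [' '] ['_']) = f.map repU from hlu] at h1
          exact hne _ h1
        · rw [show PySem.Chars.lower (PySem.Chars.replace f ['_'] [' ']) = f.map repS from hls] at h1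
          exact hne _ h1

-- ===== VERDICT (by name: the statement is the Claim_ definition above) =====
theorem clean_field_prefix_py_spec : Claim_equal_clean_field_prefix_py := by
  unfold Claim_equal_clean_field_prefix_py Spec_clean_field_prefix_py
  intro text field_name _
  rw [a_eq_canon, alt_eq_canon]
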